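-- pv_equiv track=rewrite | github.com/tlplayer/BetterQuest | extraction/extract_race_gender.py | is_clean_text
-- ===== SOURCE A (Python) =====
-- EXCLUDED_SUBSTRINGS = [
--     "attempts to run away in fear",
--     "goes into a berserker rage",
--     "is possessed",
--     "is enraged",
--     "begins to cast",
--     "dies.",
--     "flees in terror",
--     "becomes enraged",
--     "goes into a frenzy",
--     "%s ",  # Generic placeholder combat messages
-- ]
--
-- def is_clean_text(text):
--     """Checks if text is non-empty and doesn't contain generic combat noise."""
--     if text is None:
--         return False
--
--     t = text.strip()
--     if not t:
--         return False
--
--     # Check against the exclusion list (case-insensitive)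
--     for pattern in EXCLUDED_SUBSTRINGS:
--         if pattern.lower() in t.lower():
--             return False
--
--     return True
-- ===== SOURCE B (Python) =====
-- EXCLUDED_SUBSTRINGS = [
--     "attempts to run away in fear",
--     "goes into a berserker rage",
--     "is possessed",
--     "is enraged",
--     "begins to cast",
--     "dies.",
--     "flees in terror",
--     "becomes enraged",
--     "goes into a frenzy",
--     "%s ",  # Generic placeholder combat messages
-- ]
--
-- _LOWERED = [p.lower() for p in EXCLUDED_SUBSTRINGS]
--
-- def is_clean_text(text):
--     """Non-empty text with no combat noise: one pass over positions, not one scan per pattern."""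
--     if text is None:
--         return False
--     low = text.strip().lower()
--     if not low:
--         return False
--     return not any(low.startswith(p, i) for i in range(len(low)) for p in _LOWERED)
-- ===== Notes on version B (the rewrite author's own statement) =====
-- stated objective: alternative
-- what changed: Transposes the loops: instead of one full lowercase substring scan per excluded pattern, B lowers the stripped text once and makes a single left-to-right pass over positions, testing at each position whether any pre-lowered pattern starts there.
import Mathlib
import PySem

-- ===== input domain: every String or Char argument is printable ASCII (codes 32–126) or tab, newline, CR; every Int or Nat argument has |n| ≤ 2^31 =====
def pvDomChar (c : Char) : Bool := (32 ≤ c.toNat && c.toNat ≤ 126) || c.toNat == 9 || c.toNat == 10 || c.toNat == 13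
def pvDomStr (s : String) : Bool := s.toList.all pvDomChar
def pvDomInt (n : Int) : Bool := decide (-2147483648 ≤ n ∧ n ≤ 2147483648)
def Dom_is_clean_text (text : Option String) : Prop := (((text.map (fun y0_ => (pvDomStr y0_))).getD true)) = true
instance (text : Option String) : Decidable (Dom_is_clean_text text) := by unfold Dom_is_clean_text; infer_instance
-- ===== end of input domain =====

-- B changes the loop structure (one pass over positions with pre-lowered patterns,
-- instead of one substring scan per pattern); objective: alternative, not faster.

-- ===== PORT A =====
def pvExcluded : List String :=
  ["attempts to run away in fear",
   "goes into a berserker rage",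
   "is possessed",
   "is enraged",
   "begins to cast",
   "dies.",
   "flees in terror",
   "becomes enraged",
   "goes into a frenzy",
   "%s "]

-- literal port of A: strip, emptiness guard, then for each pattern test
-- 'pattern.lower() in t.lower()' (loop with early return False = any)
def is_clean_text (text : Option String) : Bool :=
  match text with
  | none => false
  | some s =>
    let t := PySem.Chars.strip s.toList
    if t = [] then false
    else if pvExcluded.any (fun p =>
        PySem.Chars.isIn (PySem.Chars.lower p.toList) (PySem.Chars.lower t)) then false
    else true

-- ===== PORT B =====
-- _LOWERED, computed once at module load
def pvLowPats : List (List Char) := pvExcluded.map (fun p => PySem.Chars.lower p.toList)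

-- the 'for i in range(len(low))' pass: at each position (= each suffix) test
-- whether any lowered pattern starts there
def pvNoiseScan (s : List Char) : Bool :=
  match s with
  | [] => false
  | c :: rest =>
    pvLowPats.any (fun p => PySem.Chars.startswith (c :: rest) p) || pvNoiseScan rest

def is_clean_text_alt (text : Option String) : Bool :=
  match text with
  | none => false
  | some s =>
    let low := PySem.Chars.lower (PySem.Chars.strip s.toList)
    if low = [] then false
    else !(pvNoiseScan low)

-- ===== PRECONDITION & SPEC =====
def Spec_is_clean_text (text : Option String) (out : Bool) : Prop := out = is_clean_text_alt text
instance (text : Option String) (out : Bool) : Decidable (Spec_is_clean_text text out) := by unfold Spec_is_clean_text; infer_instance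

-- ===== CLAIM (what is proved, stated in full; the proofs are below) =====
def Claim_equal_is_clean_text : Prop := ∀ (text : Option String), Dom_is_clean_text text → Spec_is_clean_text text (is_clean_text text)

-- ===== LEMMAS AND PROOFS =====

-- no lowered pattern is empty (a concrete fact about the literal list)
theorem pvLowPats_ne_nil : ∀ p ∈ pvLowPats, p ≠ [] := by decide

-- the position pass finds exactly the strings with some pattern as an infix
theorem pvNoiseScan_iff (s : List Char) :
    pvNoiseScan s = true ↔ ∃ p ∈ pvLowPats, p <:+: s := by
  induction s with
  | nil =>
    simp only [pvNoiseScan, List.infix_nil]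
    constructor
    · intro h; cases h
    · rintro ⟨p, hp, rfl⟩; exact absurd rfl (pvLowPats_ne_nil _ hp)
  | cons c rest ih =>
    simp only [pvNoiseScan, Bool.or_eq_true, List.any_eq_true,
      PySem.Chars.startswith_iff, ih]
    constructor
    · rintro (⟨p, hp, hpre⟩ | ⟨p, hp, hinf⟩)
      · exact ⟨p, hp, hpre.isInfix⟩
      · exact ⟨p, hp, (hinf.trans (List.suffix_cons c rest).isInfix)⟩
    · rintro ⟨p, hp, hinf⟩
      rcases List.infix_cons_iff.mp hinf with h | h
      · exact Or.inl ⟨p, hp, h⟩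
      · exact Or.inr ⟨p, hp, h⟩

theorem pvNoiseScan_eq_any (s : List Char) :
    pvNoiseScan s
      = pvExcluded.any (fun p => PySem.Chars.isIn (PySem.Chars.lower p.toList) s) := by
  rw [Bool.eq_iff_iff, pvNoiseScan_iff]
  simp only [List.any_eq_true, PySem.Chars.isIn_iff_infix, pvLowPats, List.mem_map]
  constructor
  · rintro ⟨p, ⟨q, hq, rfl⟩, h⟩; exact ⟨q, hq, h⟩
  · rintro ⟨q, hq, h⟩; exact ⟨_, ⟨q, hq, rfl⟩, h⟩

theorem pvLower_eq_nil_iff (t : List Char) : PySem.Chars.lower t = [] ↔ t = [] := by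
  cases t <;> simp [PySem.Chars.lower]

-- ===== VERDICT (by name: the statement is the Claim_ definition above) =====
theorem is_clean_text_spec : Claim_equal_is_clean_text := by
  intro text _
  unfold Spec_is_clean_text is_clean_text is_clean_text_alt
  cases text with
  | none => rfl
  | some s =>
    simp only [pvLower_eq_nil_iff]
    split
    · rfl
    · rw [pvNoiseScan_eq_any]
      cases h : pvExcluded.any
          (fun p => PySem.Chars.isIn (PySem.Chars.lower p.toList)
            (PySem.Chars.lower (PySem.Chars.strip s.toList))) <;> simp
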